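-- pv_equiv track=rewrite | github.com/quiteeasilydone/Prompt-Testing-Tool | utils/openai_helper.py | find_extreme_a
-- ===== SOURCE A (Python) =====
-- def find_extreme_a(data):
--     if not data:
--         return None, None  # 리스트가 비어있을 경우 None 반환
--
--     # 초기값 설정
--     min_a = max_a = data[0][0]
--     min_b = max_b = data[0][1]
--
--     # 리스트 순회하며 최댓값과 최솟값 업데이트
--     for a, b in data:
--         if b > max_b:
--             max_b = b
--             max_a = a
--         elif b == max_b:
--             continue  # 가장 앞의 a 값을 유지하기 위해
--
--         if b < min_b:
--             min_b = b
--             min_a = a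
--         elif b == min_b:
--             continue  # 가장 앞의 a 값을 유지하기 위해
--
--     return (max_a, max_b), (min_a, min_b)
-- ===== SOURCE B (Python) =====
-- def find_extreme_a(data):
--     if not data:
--         return None, None
--     mx = max(data, key=lambda x: x[1])
--     mn = min(data, key=lambda x: x[1])
--     return (mx[0], mx[1]), (mn[0], mn[1])
-- ===== Notes on version B (the rewrite author's own statement) =====
-- stated objective: simpler
-- what changed: Replaces A's single fused four-variable loop (with continue-based tie skipping) by two independent builtin scans max(data, key=...) and min(data, key=...), which keep the first extremal element exactly as A does.
import Mathlib
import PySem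

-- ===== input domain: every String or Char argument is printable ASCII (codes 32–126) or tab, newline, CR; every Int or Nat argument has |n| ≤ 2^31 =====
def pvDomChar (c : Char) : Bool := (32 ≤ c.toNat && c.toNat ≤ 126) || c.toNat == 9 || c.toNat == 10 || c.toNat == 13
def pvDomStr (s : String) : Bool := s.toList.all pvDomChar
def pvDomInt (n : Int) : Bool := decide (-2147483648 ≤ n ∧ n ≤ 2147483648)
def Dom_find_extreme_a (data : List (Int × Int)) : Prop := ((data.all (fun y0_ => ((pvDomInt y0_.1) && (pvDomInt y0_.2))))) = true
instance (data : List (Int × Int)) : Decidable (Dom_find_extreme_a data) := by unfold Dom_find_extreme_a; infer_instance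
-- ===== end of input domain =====

-- B replaces A's fused four-variable loop by two separate builtin max/min scans keyed on the second component (simpler decomposition, same linear cost).


-- ===== PORT A =====
-- A's loop body: state ((max_a, max_b), (min_a, min_b)); the `continue` on b == max_b
-- skips the min check, as in the Python.
def pvAStep (s : (Int × Int) × (Int × Int)) (p : Int × Int) : (Int × Int) × (Int × Int) :=
  if p.2 > s.1.2 then (p, s.2)
  else if p.2 == s.1.2 then s
  else if p.2 < s.2.2 then (s.1, p)
  else s

def find_extreme_a (data : List (Int × Int)) : (Option (Int × Int)) × (Option (Int × Int)) :=
  match data with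
  | [] => (none, none)
  | p0 :: _ =>
    let s := data.foldl pvAStep (p0, p0)
    (some (s.1.1, s.1.2), some (s.2.1, s.2.2))

-- ===== PORT B =====
def find_extreme_a_alt (data : List (Int × Int)) : (Option (Int × Int)) × (Option (Int × Int)) :=
  if data = [] then (none, none)
  else
    match PySem.List.max? data (fun x => x.2), PySem.List.min? data (fun x => x.2) with
    | some mx, some mn => (some (mx.1, mx.2), some (mn.1, mn.2))
    | _, _ => (none, none)

-- ===== PRECONDITION & SPEC =====
def Spec_find_extreme_a (data : List (Int × Int)) (out : (Option (Int × Int)) × (Option (Int × Int))) : Prop := out = find_extreme_a_alt data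
instance (data : List (Int × Int)) (out : (Option (Int × Int)) × (Option (Int × Int))) : Decidable (Spec_find_extreme_a data out) := by unfold Spec_find_extreme_a; infer_instance

-- ===== CLAIM (what is proved, stated in full; the proofs are below) =====
def Claim_equal_find_extreme_a : Prop := ∀ (data : List (Int × Int)), Dom_find_extreme_a data → Spec_find_extreme_a data (find_extreme_a data)

-- ===== LEMMAS AND PROOFS =====

-- The standalone max- and min-scans that B's builtins perform.
def pvMxStep (m p : Int × Int) : Int × Int := if m.2 < p.2 then p else m
def pvMnStep (m p : Int × Int) : Int × Int := if p.2 < m.2 then p else m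

-- A's fused fold splits into the two independent scans, given min_b <= max_b.
theorem pvA_split (t : List (Int × Int)) :
    ∀ s : (Int × Int) × (Int × Int), s.2.2 ≤ s.1.2 →
      t.foldl pvAStep s = (t.foldl pvMxStep s.1, t.foldl pvMnStep s.2) := by
  induction t with
  | nil => intro s _; rfl
  | cons p t ih =>
    rintro ⟨⟨ma, mb⟩, na, nb⟩ hs
    obtain ⟨pa, pb⟩ := p
    simp only at hs
    have hstep : pvAStep ((ma, mb), na, nb) (pa, pb)
        = (pvMxStep (ma, mb) (pa, pb), pvMnStep (na, nb) (pa, pb)) := by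
      simp only [pvAStep, pvMxStep, pvMnStep, beq_iff_eq, gt_iff_lt]
      split_ifs <;> simp_all <;> omega
    have hinv : (pvMnStep (na, nb) (pa, pb)).2 ≤ (pvMxStep (ma, mb) (pa, pb)).2 := by
      simp only [pvMxStep, pvMnStep]
      split_ifs <;> simp <;> omega
    rw [List.foldl_cons, hstep,
      ih (pvMxStep (ma, mb) (pa, pb), pvMnStep (na, nb) (pa, pb)) hinv]
    simp [List.foldl_cons]

-- PySem.List.max?/min? on a nonempty list are the plain first-extremal scans.
theorem pvMax?_cons (t : List (Int × Int)) : ∀ p0 : Int × Int,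
    PySem.List.max? (p0 :: t) (fun x => x.2) = some (t.foldl pvMxStep p0) := by
  induction t with
  | nil => intro p0; rfl
  | cons p t ih =>
    intro p0
    have h1 : PySem.List.max? (p0 :: p :: t) (fun x => x.2)
        = PySem.List.max? (pvMxStep p0 p :: t) (fun x => x.2) := by
      simp only [PySem.List.max?, List.foldl_cons, pvMxStep]
      split_ifs <;> rfl
    rw [h1, ih, List.foldl_cons]

theorem pvMin?_cons (t : List (Int × Int)) : ∀ p0 : Int × Int,
    PySem.List.min? (p0 :: t) (fun x => x.2) = some (t.foldl pvMnStep p0) := by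
  induction t with
  | nil => intro p0; rfl
  | cons p t ih =>
    intro p0
    have h1 : PySem.List.min? (p0 :: p :: t) (fun x => x.2)
        = PySem.List.min? (pvMnStep p0 p :: t) (fun x => x.2) := by
      simp only [PySem.List.min?, List.foldl_cons, pvMnStep]
      split_ifs <;> rfl
    rw [h1, ih, List.foldl_cons]

-- ===== VERDICT (by name: the statement is the Claim_ definition above) =====
theorem find_extreme_a_spec : Claim_equal_find_extreme_a := by
  intro data _
  unfold Spec_find_extreme_a
  match data with
  | [] => rfl
  | p0 :: t =>
    have hmx0 : pvMxStep p0 p0 = p0 := by simp [pvMxStep]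
    have hmn0 : pvMnStep p0 p0 = p0 := by simp [pvMnStep]
    have hsplit := pvA_split (p0 :: t) (p0, p0) (le_refl _)
    have hmax := pvMax?_cons t p0
    have hmin := pvMin?_cons t p0
    simp only [find_extreme_a, find_extreme_a_alt, hsplit, List.foldl_cons, hmx0, hmn0,
      if_neg (List.cons_ne_nil p0 t), hmax, hmin]
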